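-- pv_equiv track=rewrite | github.com/pemariano/SearchWords | SearchWords.py | AchaPADRAO
-- ===== SOURCE A (Python) =====
-- def AchaPADRAO(RETANG, PADRAO, r, i, j):
--     '''Esta funcao cria uma lista a partir de um ponto dado (i,j) numa direcao (r) e a compara com o padrao
--        Quando a direcao e contraria ao sentido de indices da matriz o passo do range e -1'''
--     if r == 11:
--         linha = [RETANG[k][j] for k in range(i, i - len(PADRAO), -1)]
--         return linha == PADRAO
--     if r == 22:
--         linha = [RETANG[i][l] for l in range(j, j + len(PADRAO))]
--         return linha == PADRAO
--     if r == 33: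
--         linha = [RETANG[k][j] for k in range(i, i + len(PADRAO))]
--         return linha == PADRAO
--     if r == 44:
--         linha = [RETANG[i][l] for l in range(j, j - len(PADRAO), -1)]
--         return linha == PADRAO
--     if r == 12:
--         linha = [RETANG[k][l] for l, k in zip(range(j, j + len(PADRAO)), range(i, i - len(PADRAO), -1))]
--         return linha == PADRAO
--     if r == 32:
--         linha = [RETANG[k][l] for l, k in zip(range(j, j + len(PADRAO)), range(i, i + len(PADRAO)))]
--         return linha == PADRAO
--     if r == 34:
--         linha = [RETANG[k][l] for l, k in zip(range(j, j - len(PADRAO), -1), range(i, i + len(PADRAO)))]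
--         return linha == PADRAO
--     if r == 14:
--         linha = [RETANG[k][l] for l, k in zip(range(j, j - len(PADRAO), -1), range(i, i - len(PADRAO), -1))]
--         return linha == PADRAO
-- ===== SOURCE B (Python) =====
-- def AchaPADRAO(RETANG, PADRAO, r, i, j):
--     '''Decode the direction arithmetically from the two digits of r, then recursively
--        consume PADRAO cell by cell with early exit -- the line is never materialized.'''
--     if r not in (11, 22, 33, 44, 12, 32, 34, 14):
--         return None
--     a, b = divmod(r, 10)
--     dr = (a == 3) - (a == 1)
--     dc = (b == 2) - (b == 4)
--
--     def walk(pat, k, l):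
--         if not pat:
--             return True
--         if RETANG[k][l] != pat[0]:
--             return False
--         return walk(pat[1:], k + dr, l + dc)
--
--     return walk(PADRAO, i, j)
-- ===== Notes on version B (the rewrite author's own statement) =====
-- stated objective: alternative
-- what changed: Instead of materializing the whole line with a branch-specific range/zip comprehension and comparing it to PADRAO, B decodes the direction arithmetically from the two digits of r (divmod, no branch table) and recursively consumes PADRAO cell by cell with early exit on the first mismatch, never building the line.
import Mathlib
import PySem

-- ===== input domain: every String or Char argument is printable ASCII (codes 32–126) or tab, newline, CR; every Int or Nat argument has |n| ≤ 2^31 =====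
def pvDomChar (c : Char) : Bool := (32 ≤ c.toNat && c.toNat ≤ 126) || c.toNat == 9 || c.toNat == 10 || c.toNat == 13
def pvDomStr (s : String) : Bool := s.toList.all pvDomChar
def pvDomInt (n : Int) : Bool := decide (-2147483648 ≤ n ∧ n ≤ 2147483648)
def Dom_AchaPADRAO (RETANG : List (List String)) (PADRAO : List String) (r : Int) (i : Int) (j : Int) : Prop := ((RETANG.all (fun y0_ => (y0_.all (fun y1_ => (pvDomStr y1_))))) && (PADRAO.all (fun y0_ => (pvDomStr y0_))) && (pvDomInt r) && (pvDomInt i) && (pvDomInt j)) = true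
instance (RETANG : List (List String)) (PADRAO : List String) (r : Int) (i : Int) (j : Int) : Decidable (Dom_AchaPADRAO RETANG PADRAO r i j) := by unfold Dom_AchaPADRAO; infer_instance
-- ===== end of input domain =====

-- B decodes the direction arithmetically from the digits of r and walks the pattern
-- recursively with early exit, never materializing the line (objective: alternative).

-- RETANG[k][l] with Python's negative-index rule; none = IndexError
def pvCell (RETANG : List (List String)) (k l : Int) : Option String :=
  (PySem.List.pyGet? RETANG k).bind (fun row => PySem.List.pyGet? row l)

-- ===== PORT A =====
def AchaPADRAO (RETANG : List (List String)) (PADRAO : List String) (r : Int) (i : Int) (j : Int) : Option Bool :=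
  if r = 11 then
    ((PySem.List.pyRange i (i - (PADRAO.length : Int)) (-1)).mapM (fun k => pvCell RETANG k j)).map (fun linha => linha == PADRAO)
  else if r = 22 then
    ((PySem.List.pyRange j (j + (PADRAO.length : Int)) 1).mapM (fun l => pvCell RETANG i l)).map (fun linha => linha == PADRAO)
  else if r = 33 then
    ((PySem.List.pyRange i (i + (PADRAO.length : Int)) 1).mapM (fun k => pvCell RETANG k j)).map (fun linha => linha == PADRAO)
  else if r = 44 then
    ((PySem.List.pyRange j (j - (PADRAO.length : Int)) (-1)).mapM (fun l => pvCell RETANG i l)).map (fun linha => linha == PADRAO)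
  else if r = 12 then
    (((PySem.List.pyRange j (j + (PADRAO.length : Int)) 1).zip (PySem.List.pyRange i (i - (PADRAO.length : Int)) (-1))).mapM (fun p => pvCell RETANG p.2 p.1)).map (fun linha => linha == PADRAO)
  else if r = 32 then
    (((PySem.List.pyRange j (j + (PADRAO.length : Int)) 1).zip (PySem.List.pyRange i (i + (PADRAO.length : Int)) 1)).mapM (fun p => pvCell RETANG p.2 p.1)).map (fun linha => linha == PADRAO)
  else if r = 34 then
    (((PySem.List.pyRange j (j - (PADRAO.length : Int)) (-1)).zip (PySem.List.pyRange i (i + (PADRAO.length : Int)) 1)).mapM (fun p => pvCell RETANG p.2 p.1)).map (fun linha => linha == PADRAO)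
  else if r = 14 then
    (((PySem.List.pyRange j (j - (PADRAO.length : Int)) (-1)).zip (PySem.List.pyRange i (i - (PADRAO.length : Int)) (-1))).mapM (fun p => pvCell RETANG p.2 p.1)).map (fun linha => linha == PADRAO)
  else none

-- ===== PORT B =====
-- the recursive early-exit walk of Source B: none = IndexError while reading a cell
def pvWalk (RETANG : List (List String)) (dr dc : Int) : List String → Int → Int → Option Bool
  | [], _, _ => some true
  | p :: ps, k, l =>
    match pvCell RETANG k l with
    | none => none
    | some s => if s ≠ p then some false else pvWalk RETANG dr dc ps (k + dr) (l + dc)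

def AchaPADRAO_alt (RETANG : List (List String)) (PADRAO : List String) (r : Int) (i : Int) (j : Int) : Option Bool :=
  if r ∈ ([11, 22, 33, 44, 12, 32, 34, 14] : List Int) then
    let a := PySem.Int.floordiv r 10
    let b := PySem.Int.mod r 10
    let dr := (if a = 3 then (1 : Int) else 0) - (if a = 1 then 1 else 0)
    let dc := (if b = 2 then (1 : Int) else 0) - (if b = 4 then 1 else 0)
    pvWalk RETANG dr dc PADRAO i j
  else none

-- ===== PRECONDITION & SPEC =====
-- Pre_ excludes exactly the inputs where A raises IndexError: a recognized direction
-- code whose full traversal steps on a cell outside Python's (negative-index) valid range.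
def Pre_AchaPADRAO (RETANG : List (List String)) (PADRAO : List String) (r : Int) (i : Int) (j : Int) : Prop :=
  ∀ p ∈ [((11 : Int), ((-1 : Int), (0 : Int))), (22, (0, 1)), (33, (1, 0)), (44, (0, -1)),
         (12, (-1, 1)), (32, (1, 1)), (34, (1, -1)), (14, (-1, -1))],
    p.1 = r → ∀ t ∈ List.range PADRAO.length,
      pvCell RETANG (i + p.2.1 * (t : Int)) (j + p.2.2 * (t : Int)) ≠ none
instance (RETANG : List (List String)) (PADRAO : List String) (r : Int) (i : Int) (j : Int) : Decidable (Pre_AchaPADRAO RETANG PADRAO r i j) := by unfold Pre_AchaPADRAO; infer_instance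

def pvWitness_AchaPADRAO : List (List String) × List String × Int × Int × Int :=
  ([["a", "b"], ["c", "d"]], ["a", "b"], 22, 0, 0)

def Spec_AchaPADRAO (RETANG : List (List String)) (PADRAO : List String) (r : Int) (i : Int) (j : Int) (out : Option Bool) : Prop := out = AchaPADRAO_alt RETANG PADRAO r i j
instance (RETANG : List (List String)) (PADRAO : List String) (r : Int) (i : Int) (j : Int) (out : Option Bool) : Decidable (Spec_AchaPADRAO RETANG PADRAO r i j out) := by unfold Spec_AchaPADRAO; infer_instance

-- ===== CLAIM (what is proved, stated in full; the proofs are below) =====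
def Claim_equal_AchaPADRAO : Prop := ∀ (RETANG : List (List String)) (PADRAO : List String) (r : Int) (i : Int) (j : Int), Dom_AchaPADRAO RETANG PADRAO r i j → Pre_AchaPADRAO RETANG PADRAO r i j → Spec_AchaPADRAO RETANG PADRAO r i j (AchaPADRAO RETANG PADRAO r i j)

-- ===== LEMMAS AND PROOFS =====
theorem pv_mapM_map {α β γ : Type} (f : α → β) (g : β → Option γ) (l : List α) :
    (l.map f).mapM g = l.mapM (fun x => g (f x)) := by
  induction l with
  | nil => rfl
  | cons a l ih => simp [List.mapM_cons, ih]

theorem pv_mapM_congr {α γ : Type} (f g : α → Option γ) (l : List α)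
    (h : ∀ x ∈ l, f x = g x) : l.mapM f = l.mapM g := by
  induction l with
  | nil => rfl
  | cons a l ih =>
    simp only [List.mapM_cons, h a (List.mem_cons_self), ih (fun x hx => h x (List.mem_cons_of_mem a hx))]

theorem pv_mapM_isSome {α γ : Type} (f : α → Option γ) (l : List α)
    (h : ∀ x ∈ l, f x ≠ none) : ∃ ys, l.mapM f = some ys := by
  induction l with
  | nil => exact ⟨[], rfl⟩
  | cons a l ih =>
    obtain ⟨y, hy⟩ := Option.ne_none_iff_exists'.mp (h a List.mem_cons_self)
    obtain ⟨ys, hys⟩ := ih (fun x hx => h x (List.mem_cons_of_mem a hx))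
    exact ⟨y :: ys, by simp [List.mapM_cons, hy, hys]⟩

-- the generic materialize-then-compare form equals the early-exit walk, given that
-- every cell on the full path is readable
theorem pv_gen_eq_walk (RETANG : List (List String)) (dr dc : Int) :
    ∀ (pat : List String) (k l : Int),
      (∀ t ∈ List.range pat.length, pvCell RETANG (k + dr * (t : Int)) (l + dc * (t : Int)) ≠ none) →
      ((List.range pat.length).mapM (fun (t : Nat) => pvCell RETANG (k + dr * (t : Int)) (l + dc * (t : Int)))).map
          (fun linha => linha == pat)
        = pvWalk RETANG dr dc pat k l := by
  intro pat
  induction pat with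
  | nil => intro k l _; rfl
  | cons p ps ih =>
    intro k l h
    have h0 : pvCell RETANG k l ≠ none := by
      have := h 0 (by simp)
      simpa using this
    obtain ⟨s, hs⟩ := Option.ne_none_iff_exists'.mp h0
    have hshift : ∀ t ∈ List.range ps.length,
        pvCell RETANG ((k + dr) + dr * (t : Int)) ((l + dc) + dc * (t : Int)) ≠ none := by
      intro t ht
      have := h (t + 1) (by simpa using Nat.succ_lt_succ (List.mem_range.mp ht))
      have e1 : k + dr * ((t + 1 : Nat) : Int) = (k + dr) + dr * (t : Int) := by push_cast; ring
      have e2 : l + dc * ((t + 1 : Nat) : Int) = (l + dc) + dc * (t : Int) := by push_cast; ring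
      rwa [e1, e2] at this
    have hfun : ∀ t ∈ List.range ps.length,
        pvCell RETANG (k + dr * ((Nat.succ t : Nat) : Int)) (l + dc * ((Nat.succ t : Nat) : Int))
          = pvCell RETANG ((k + dr) + dr * (t : Int)) ((l + dc) + dc * (t : Int)) := by
      intro t _
      congr 1 <;> push_cast <;> ring
    rw [List.length_cons, List.range_succ_eq_map, List.mapM_cons, pv_mapM_map]
    rw [pv_mapM_congr _ _ _ hfun]
    simp only [Nat.cast_zero, mul_zero, add_zero, hs]
    obtain ⟨ys, hys⟩ := pv_mapM_isSome _ _ hshift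
    rw [hys]
    by_cases hsp : s = p
    · subst hsp
      have := ih (k + dr) (l + dc) hshift
      rw [hys] at this
      simp only [Option.map_some] at this
      simp [pvWalk, hs, this]
    · simp [pvWalk, hs, hsp, List.cons_beq_cons, beq_eq_false_iff_ne.mpr hsp]

-- pyRange / zip rewrites into the generic (List.range, k + d*t) form
theorem pv_range_down (a : Int) (m : Nat) :
    PySem.List.pyRange a (a - (m : Int)) (-1) = (List.range m).map (fun (t : Nat) => a + (-1) * (t : Int)) := by
  rw [PySem.List.pyRange_neg_one]
  have : (a - (a - (m : Int))).toNat = m := by omega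
  rw [this]
  apply List.map_congr_left
  intro t _
  ring

theorem pv_range_up (a : Int) (m : Nat) :
    PySem.List.pyRange a (a + (m : Int)) 1 = (List.range m).map (fun (t : Nat) => a + 1 * (t : Int)) := by
  rw [PySem.List.pyRange_one]
  have : (a + (m : Int) - a).toNat = m := by omega
  rw [this]
  apply List.map_congr_left
  intro t _
  ring

theorem pv_zip_map_range {α β : Type} (f : Nat → α) (g : Nat → β) (m : Nat) :
    ((List.range m).map f).zip ((List.range m).map g) = (List.range m).map (fun t => (f t, g t)) := by
  apply List.ext_getElem
  · simp
  · intro n h1 h2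
    simp

theorem AchaPADRAO_spec : Claim_equal_AchaPADRAO := by
  intro RETANG PADRAO r i j _ hpre
  unfold Spec_AchaPADRAO AchaPADRAO
  unfold Pre_AchaPADRAO at hpre
  split_ifs with h11 h22 h33 h44 h12 h32 h34 h14
  · subst h11
    have hp := hpre (11, (-1, 0)) (by simp) rfl
    rw [show AchaPADRAO_alt RETANG PADRAO 11 i j = pvWalk RETANG (-1) 0 PADRAO i j from rfl,
        pv_range_down, pv_mapM_map,
        pv_mapM_congr _ (fun (t : Nat) => pvCell RETANG (i + (-1) * (t : Int)) (j + 0 * (t : Int))) _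
          (by intro t _; congr 1; ring),
        pv_gen_eq_walk RETANG (-1) 0 PADRAO i j hp]
  · subst h22
    have hp := hpre (22, (0, 1)) (by simp) rfl
    rw [show AchaPADRAO_alt RETANG PADRAO 22 i j = pvWalk RETANG 0 1 PADRAO i j from rfl,
        pv_range_up, pv_mapM_map,
        pv_mapM_congr _ (fun (t : Nat) => pvCell RETANG (i + 0 * (t : Int)) (j + 1 * (t : Int))) _
          (by intro t _; congr 1; ring),
        pv_gen_eq_walk RETANG 0 1 PADRAO i j hp]
  · subst h33
    have hp := hpre (33, (1, 0)) (by simp) rfl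
    rw [show AchaPADRAO_alt RETANG PADRAO 33 i j = pvWalk RETANG 1 0 PADRAO i j from rfl,
        pv_range_up, pv_mapM_map,
        pv_mapM_congr _ (fun (t : Nat) => pvCell RETANG (i + 1 * (t : Int)) (j + 0 * (t : Int))) _
          (by intro t _; congr 1; ring),
        pv_gen_eq_walk RETANG 1 0 PADRAO i j hp]
  · subst h44
    have hp := hpre (44, (0, -1)) (by simp) rfl
    rw [show AchaPADRAO_alt RETANG PADRAO 44 i j = pvWalk RETANG 0 (-1) PADRAO i j from rfl,
        pv_range_down, pv_mapM_map,
        pv_mapM_congr _ (fun (t : Nat) => pvCell RETANG (i + 0 * (t : Int)) (j + (-1) * (t : Int))) _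
          (by intro t _; congr 1; ring),
        pv_gen_eq_walk RETANG 0 (-1) PADRAO i j hp]
  · subst h12
    have hp := hpre (12, (-1, 1)) (by simp) rfl
    rw [show AchaPADRAO_alt RETANG PADRAO 12 i j = pvWalk RETANG (-1) 1 PADRAO i j from rfl,
        pv_range_up, pv_range_down, pv_zip_map_range, pv_mapM_map,
        pv_mapM_congr _ (fun (t : Nat) => pvCell RETANG (i + (-1) * (t : Int)) (j + 1 * (t : Int))) _
          (fun t _ => rfl),
        pv_gen_eq_walk RETANG (-1) 1 PADRAO i j hp]
  · subst h32
    have hp := hpre (32, (1, 1)) (by simp) rfl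
    rw [show AchaPADRAO_alt RETANG PADRAO 32 i j = pvWalk RETANG 1 1 PADRAO i j from rfl,
        pv_range_up, pv_range_up, pv_zip_map_range, pv_mapM_map,
        pv_mapM_congr _ (fun (t : Nat) => pvCell RETANG (i + 1 * (t : Int)) (j + 1 * (t : Int))) _
          (fun t _ => rfl),
        pv_gen_eq_walk RETANG 1 1 PADRAO i j hp]
  · subst h34
    have hp := hpre (34, (1, -1)) (by simp) rfl
    rw [show AchaPADRAO_alt RETANG PADRAO 34 i j = pvWalk RETANG 1 (-1) PADRAO i j from rfl,
        pv_range_down, pv_range_up, pv_zip_map_range, pv_mapM_map,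
        pv_mapM_congr _ (fun (t : Nat) => pvCell RETANG (i + 1 * (t : Int)) (j + (-1) * (t : Int))) _
          (fun t _ => rfl),
        pv_gen_eq_walk RETANG 1 (-1) PADRAO i j hp]
  · subst h14
    have hp := hpre (14, (-1, -1)) (by simp) rfl
    rw [show AchaPADRAO_alt RETANG PADRAO 14 i j = pvWalk RETANG (-1) (-1) PADRAO i j from rfl,
        pv_range_down, pv_range_down, pv_zip_map_range, pv_mapM_map,
        pv_mapM_congr _ (fun (t : Nat) => pvCell RETANG (i + (-1) * (t : Int)) (j + (-1) * (t : Int))) _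
          (fun t _ => rfl),
        pv_gen_eq_walk RETANG (-1) (-1) PADRAO i j hp]
  · rw [show AchaPADRAO_alt RETANG PADRAO r i j
          = if r ∈ ([11, 22, 33, 44, 12, 32, 34, 14] : List Int) then _ else none from rfl]
    rw [if_neg (by simp [h11, h22, h33, h44, h12, h32, h34, h14])]
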